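-- pv_equiv track=rewrite | github.com/shakfu/soundlab | c/euclid/euclid_numpy.py | geodesics
-- ===== SOURCE A (Python) =====
-- def onsets(pattern):
--     """ Given a pattern (a list of 1's and 0's), return the indices of the onsets (1's)."""
--     return [i for i, x in enumerate(pattern) if x == 1]
--
-- def geodesics(pattern):
--     """ Return the minimum differences, mod(len(pattern)), of all ordered pairs, i,j, of onsets (1's) in the given pattern."""
--     ons = onsets(pattern)
--     n = len(pattern)
--     ans = [
--         min((ons[i] - ons[j]) % n, (ons[j] - ons[i]) % n)
--         for i in range(len(ons))
--         for j in range(i)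
--     ]
--     ans.sort()
--     return ans
-- ===== SOURCE B (Python) =====
-- def geodesics(pattern):
--     """ Return the minimum differences, mod(len(pattern)), of all ordered pairs, i,j, of onsets (1's) in the given pattern."""
--     n = len(pattern)
--     ons = [i for i, x in enumerate(pattern) if x == 1]
--     counts = [0] * (n // 2 + 1)
--     for i in range(len(ons)):
--         for j in range(i):
--             diff = ons[i] - ons[j]
--             counts[min(diff, n - diff)] += 1
--     out = []
--     for d, c in enumerate(counts):
--         out.extend([d] * c)
--     return out
-- ===== Notes on version B (the rewrite author's own statement) =====
-- stated objective: alternative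
-- what changed: B bucket-counts each pair's circular distance (bounded by n//2) into a preallocated table and emits the table in index order, replacing A's intermediate pair list and comparison sort; B also uses the ordered-onsets fact to drop the two mod operations per pair. It trades the O(k^2 log k) sort for an O(n)-sized count table scan, which is not measurably faster in CPython.
import Mathlib
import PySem

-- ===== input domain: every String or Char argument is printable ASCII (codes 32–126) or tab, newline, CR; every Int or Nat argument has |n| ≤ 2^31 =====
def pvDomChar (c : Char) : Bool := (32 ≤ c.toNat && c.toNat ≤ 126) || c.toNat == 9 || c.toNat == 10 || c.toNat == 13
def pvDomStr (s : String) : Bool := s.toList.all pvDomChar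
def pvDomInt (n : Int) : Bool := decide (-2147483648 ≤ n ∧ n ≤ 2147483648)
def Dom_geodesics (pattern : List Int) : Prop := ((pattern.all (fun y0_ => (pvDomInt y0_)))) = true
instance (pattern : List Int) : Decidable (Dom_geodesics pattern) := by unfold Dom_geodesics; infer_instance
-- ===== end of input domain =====

-- B replaces A's comparison sort of the pairwise circular onset distances by a counting
-- (bucket) sort over the bounded range 0..n//2; objective: alternative (same measured cost).

-- ===== PORT A =====
def onsets (pattern : List Int) : List Int :=
  ((PySem.List.enumerate pattern).filter (fun p => p.2 == 1)).map (fun p => p.1)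

def geodesics (pattern : List Int) : List Int :=
  let ons := onsets pattern
  let n : Int := (pattern.length : Int)
  let ans := (List.range ons.length).flatMap (fun i =>
    (List.range i).map (fun j =>
      min (PySem.Int.mod (ons.getD i 0 - ons.getD j 0) n)
          (PySem.Int.mod (ons.getD j 0 - ons.getD i 0) n)))
  PySem.List.sorted ans (fun x => x) false

-- ===== PORT B =====
-- Source B's onset indices are the nonnegative enumerate indices; ported as Nat (exact here)
def onsetsN (pattern : List Int) : List Nat :=
  ((PySem.List.enumerate pattern).filter (fun p => p.2 == 1)).map (fun p => p.1.toNat)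

-- counts[d] += 1
def bumpB (cs : List Nat) (d : Nat) : List Nat := cs.set d (cs.getD d 0 + 1)

def geodesics_alt (pattern : List Int) : List Int :=
  let n := pattern.length
  let ons := onsetsN pattern
  let counts := (List.range ons.length).foldl (fun cs i =>
      (List.range i).foldl (fun cs j =>
        let diff := ons.getD i 0 - ons.getD j 0
        bumpB cs (min diff (n - diff))) cs)
    (List.replicate (n / 2 + 1) 0)
  (PySem.List.enumerate counts).flatMap (fun p => List.replicate p.2 p.1)

-- ===== PRECONDITION & SPEC =====
def Spec_geodesics (pattern : List Int) (out : List Int) : Prop := out = geodesics_alt pattern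
instance (pattern : List Int) (out : List Int) : Decidable (Spec_geodesics pattern out) := by unfold Spec_geodesics; infer_instance

-- ===== CLAIM (what is proved, stated in full; the proofs are below) =====
def Claim_equal_geodesics : Prop := ∀ (pattern : List Int), Dom_geodesics pattern → Spec_geodesics pattern (geodesics pattern)

-- ===== LEMMAS AND PROOFS =====

-- the multiset of pair distances, over Nat
def pairVals (o : List Nat) (n : Nat) : List Nat :=
  (List.range o.length).flatMap (fun i => (List.range i).map (fun j =>
    min (o.getD i 0 - o.getD j 0) (n - (o.getD i 0 - o.getD j 0))))

-- A's onset list is the Int cast of B's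
theorem onsets_eq_cast (pattern : List Int) :
    onsets pattern = (onsetsN pattern).map (fun k : Nat => (k : Int)) := by
  unfold onsets onsetsN
  rw [List.map_map]
  apply List.map_congr_left
  intro p hp
  obtain ⟨k, hk, rfl⟩ := (PySem.List.mem_enumerate_iff _ _ _).1 (List.mem_of_mem_filter hp)
  simp

theorem onsetsN_pairwise (pattern : List Int) :
    (onsetsN pattern).Pairwise (· < ·) := by
  unfold onsetsN
  apply List.Pairwise.map
  case H =>
    exact fun {a b} h => h
  apply List.Pairwise.imp_of_mem (R := fun p q => p.1 < q.1)
  · intro a b ha hb h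
    obtain ⟨k, hk, rfl⟩ := (PySem.List.mem_enumerate_iff _ _ _).1 (List.mem_of_mem_filter ha)
    obtain ⟨k', hk', rfl⟩ := (PySem.List.mem_enumerate_iff _ _ _).1 (List.mem_of_mem_filter hb)
    simp at h ⊢; omega
  · exact (PySem.List.pairwise_lt_enumerate _ _).filter _

theorem onsetsN_bound (pattern : List Int) :
    ∀ x ∈ onsetsN pattern, x < pattern.length := by
  intro x hx
  unfold onsetsN at hx
  obtain ⟨p, hp, rfl⟩ := List.mem_map.1 hx
  obtain ⟨k, hk, rfl⟩ := (PySem.List.mem_enumerate_iff _ _ _).1 (List.mem_of_mem_filter hp)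
  simpa using hk

theorem onsetsN_getD_lt (pattern : List Int) {i j : Nat}
    (hj : j < i) (hi : i < (onsetsN pattern).length) :
    (onsetsN pattern).getD j 0 < (onsetsN pattern).getD i 0 := by
  have hp := onsetsN_pairwise pattern
  rw [List.pairwise_iff_getElem] at hp
  have hj' : j < (onsetsN pattern).length := lt_trans hj hi
  have := hp j i hj' hi hj
  rwa [List.getD_eq_getElem _ _ hj', List.getD_eq_getElem _ _ hi]

theorem pairVals_bound (o : List Nat) (n : Nat) :
    ∀ v ∈ pairVals o n, v ≤ n / 2 := by
  intro v hv
  obtain ⟨i, hi, hv⟩ := List.mem_flatMap.1 hv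
  obtain ⟨j, hj, rfl⟩ := List.mem_map.1 hv
  omega

-- A's pair list is the Int cast of pairVals
theorem ansA_eq_cast (pattern : List Int) :
    (List.range (onsets pattern).length).flatMap (fun i =>
      (List.range i).map (fun j =>
        min (PySem.Int.mod ((onsets pattern).getD i 0 - (onsets pattern).getD j 0) (pattern.length : Int))
            (PySem.Int.mod ((onsets pattern).getD j 0 - (onsets pattern).getD i 0) (pattern.length : Int))))
    = (pairVals (onsetsN pattern) pattern.length).map (fun k : Nat => (k : Int)) := by
  rw [pairVals, List.map_flatMap, onsets_eq_cast pattern]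
  simp only [List.length_map]
  apply List.flatMap_congr
  intro i hi
  rw [List.mem_range] at hi
  rw [List.map_map]
  apply List.map_congr_left
  intro j hj
  rw [List.mem_range] at hj
  have hj' : j < (onsetsN pattern).length := lt_trans hj hi
  set o := onsetsN pattern with ho
  set a := o.getD j 0 with ha
  set b := o.getD i 0 with hb
  have hmap : ∀ (k : Nat) (hk : k < o.length),
      (List.map (fun k : Nat => (k : Int)) o).getD k 0 = ((o.getD k 0 : Nat) : Int) := by
    intro k hk
    rw [List.getD_eq_getElem _ _ (by simpa using hk), List.getElem_map,
        List.getD_eq_getElem _ _ hk]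
  have hab : a < b := onsetsN_getD_lt pattern hj hi
  have hbn : b < pattern.length := by
    have hm : o[i] ∈ o := List.getElem_mem hi
    have := onsetsN_bound pattern o[i] hm
    rw [hb, List.getD_eq_getElem _ _ hi]; exact this
  have hnpos : 0 < (pattern.length : Int) := by omega
  rw [hmap i hi, hmap j hj', Function.comp]
  rw [PySem.Int.mod_eq_emod_of_pos hnpos, PySem.Int.mod_eq_emod_of_pos hnpos]
  have h1 : ((b : Int) - a) % (pattern.length : Int) = (b : Int) - a :=
    Int.emod_eq_of_lt (by omega) (by omega)
  have h2 : ((a : Int) - b) % (pattern.length : Int)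
      = (pattern.length : Int) - ((b : Int) - a) := by
    rw [show (a : Int) - b = ((pattern.length : Int) - ((b : Int) - a)) + (pattern.length : Int) * (-1) by ring,
        Int.add_mul_emod_self_left]
    exact Int.emod_eq_of_lt (by omega) (by omega)
  rw [h1, h2]
  have e1 : (((b - a : Nat)) : Int) = (b : Int) - a := by omega
  have e2 : (((pattern.length - (b - a) : Nat)) : Int)
      = (pattern.length : Int) - ((b : Int) - a) := by omega
  rw [Nat.cast_min, e1, e2]

-- nested fold = fold over the flattened list
theorem foldl_nested_eq_flatMap {α : Type} (step : List Nat → α → List Nat)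
    (h : Nat → List α) (l : List Nat) (init : List Nat) :
    l.foldl (fun cs i => (h i).foldl step cs) init = ((l.flatMap h).foldl step init) := by
  induction l generalizing init with
  | nil => rfl
  | cons x xs ih => simp [List.flatMap_cons, List.foldl_append, ih]

theorem length_foldl_bumpB (vs : List Nat) (cs : List Nat) :
    (vs.foldl bumpB cs).length = cs.length := by
  induction vs generalizing cs with
  | nil => rfl
  | cons v vs ih => simp [List.foldl_cons, ih, bumpB]

-- the count table after all bumps holds exactly the multiplicities
theorem getD_foldl_bumpB (vs : List Nat) (cs : List Nat)
    (hb : ∀ v ∈ vs, v < cs.length) (d : Nat) :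
    (vs.foldl bumpB cs).getD d 0 = cs.getD d 0 + vs.count d := by
  induction vs generalizing cs with
  | nil => simp
  | cons v vs ih =>
    have hv : v < cs.length := hb v (List.mem_cons_self ..)
    rw [List.foldl_cons, ih _ (fun w hw => by simp [bumpB]; exact hb w (List.mem_cons_of_mem _ hw))]
    have key : (bumpB cs v).getD d 0 = cs.getD d 0 + if v = d then 1 else 0 := by
      unfold bumpB
      rcases eq_or_ne v d with rfl | hne
      · simp [List.getD, hv]
      · simp [List.getD, hne]
    rw [key, List.count_cons]
    simp only [beq_iff_eq]
    rcases eq_or_ne v d with rfl | hvd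
    · simp; omega
    · simp [hvd]

-- expansion of the count table: sorted, and with the table's multiplicities
theorem expand_mem_ge (cs : List Nat) (s : Int) :
    ∀ y ∈ (PySem.List.enumerate cs s).flatMap (fun p => List.replicate p.2 p.1), s ≤ y := by
  intro y hy
  obtain ⟨p, hp, hyp⟩ := List.mem_flatMap.1 hy
  obtain ⟨k, hk, rfl⟩ := (PySem.List.mem_enumerate_iff _ _ _).1 hp
  have := List.eq_of_mem_replicate hyp
  omega

theorem expand_pairwise (cs : List Nat) (s : Int) :
    ((PySem.List.enumerate cs s).flatMap (fun p => List.replicate p.2 p.1)).Pairwise (· ≤ ·) := by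
  induction cs generalizing s with
  | nil => simp [PySem.List.enumerate]
  | cons c cst ih =>
    rw [PySem.List.enumerate_cons, List.flatMap_cons, List.pairwise_append]
    refine ⟨?_, ih (s+1), ?_⟩
    · rw [List.pairwise_replicate]; right; rfl
    · intro a ha b hb
      have := List.eq_of_mem_replicate ha
      have := expand_mem_ge cst (s+1) b hb
      omega

theorem expand_count (cs : List Nat) (s : Int) (x : Int) :
    ((PySem.List.enumerate cs s).flatMap (fun p => List.replicate p.2 p.1)).count x
    = if s ≤ x ∧ x < s + cs.length then cs.getD (x - s).toNat 0 else 0 := by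
  induction cs generalizing s with
  | nil => simp [PySem.List.enumerate]
  | cons c cst ih =>
    rw [PySem.List.enumerate_cons, List.flatMap_cons, List.count_append, ih (s+1),
        List.count_replicate]
    by_cases hxs : x = s
    · subst hxs
      simp only [beq_self_eq_true, if_true]
      have h1 : ¬ (x + 1 ≤ x ∧ x < x + 1 + cst.length) := by omega
      rw [if_neg h1, if_pos (by push_cast [List.length_cons]; omega)]
      simp
    · rw [if_neg (by simpa using fun h => hxs h.symm)]
      by_cases h2 : s + 1 ≤ x ∧ x < s + 1 + cst.length
      · rw [if_pos h2, if_pos (by push_cast [List.length_cons] at h2 ⊢; omega)]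
        have h3 : (x - s).toNat = (x - (s+1)).toNat + 1 := by omega
        simp [h3]
      · rw [if_neg h2, if_neg (by push_cast [List.length_cons] at h2 ⊢; omega)]

-- the main equality: A's sorted pair list is exactly B's bucket expansion
theorem geodesics_eq (pattern : List Int) : geodesics pattern = geodesics_alt pattern := by
  simp only [geodesics, geodesics_alt]
  set o := onsetsN pattern with ho
  set n := pattern.length with hn
  have hcounts :
      (List.range o.length).foldl (fun cs i =>
        (List.range i).foldl (fun cs j =>
          bumpB cs (min (o.getD i 0 - o.getD j 0) (n - (o.getD i 0 - o.getD j 0)))) cs)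
      (List.replicate (n / 2 + 1) 0)
      = (pairVals o n).foldl bumpB (List.replicate (n / 2 + 1) 0) := by
    rw [pairVals, ← foldl_nested_eq_flatMap bumpB
      (fun i => (List.range i).map (fun j =>
        min (o.getD i 0 - o.getD j 0) (n - (o.getD i 0 - o.getD j 0))))]
    simp only [List.foldl_map]
  rw [hcounts]
  set counts := (pairVals o n).foldl bumpB (List.replicate (n / 2 + 1) 0) with hc
  have hlen : counts.length = n / 2 + 1 := by
    rw [hc, length_foldl_bumpB, List.length_replicate]
  have hbd : ∀ v ∈ pairVals o n, v < (List.replicate (n / 2 + 1) 0).length := by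
    intro v hv
    have := pairVals_bound o n v hv
    rw [List.length_replicate]; omega
  have hgetD : ∀ d : Nat, counts.getD d 0 = (pairVals o n).count d := by
    intro d
    rw [hc, getD_foldl_bumpB _ _ hbd]
    have : (List.replicate (n / 2 + 1) (0 : Nat)).getD d 0 = 0 := by
      simp only [List.getD, List.getElem?_replicate]
      split <;> rfl
    omega
  have hperm : ((PySem.List.enumerate counts).flatMap (fun p => List.replicate p.2 p.1)).Perm
      ((List.range (onsets pattern).length).flatMap (fun i =>
        (List.range i).map (fun j =>
          min (PySem.Int.mod ((onsets pattern).getD i 0 - (onsets pattern).getD j 0) (n : Int))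
              (PySem.Int.mod ((onsets pattern).getD j 0 - (onsets pattern).getD i 0) (n : Int))))) := by
    rw [ansA_eq_cast pattern, List.perm_iff_count]
    intro x
    rw [expand_count counts 0 x]
    by_cases hx : 0 ≤ x ∧ x < (counts.length : Int)
    · rw [if_pos (by omega)]
      have hxx : x = ((x.toNat : Nat) : Int) := by omega
      rw [Int.sub_zero, hxx, List.count_map_of_injective _ _ (fun a b => by omega)]
      simp only [Int.toNat_natCast]
      rw [hgetD]
    · rw [if_neg (by omega)]
      symm
      rw [List.count_eq_zero]
      intro hmem
      obtain ⟨v, hv, rfl⟩ := List.mem_map.1 hmem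
      have h1 := pairVals_bound o n v hv
      have h2 : v < counts.length := by omega
      omega
  exact PySem.List.sorted_id_eq_of_perm_of_pairwise _ _ hperm (expand_pairwise counts 0)

-- ===== VERDICT (by name: the statement is the Claim_ definition above) =====
theorem geodesics_spec : Claim_equal_geodesics := by
  intro pattern _
  exact geodesics_eq pattern
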